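-- pv_equiv track=rewrite | github.com/kangbm94/HypTPC-Analysis | Functions.py | MaxCh
-- ===== SOURCE A (Python) =====
-- def MaxCh(tags):
--     a0 = 0
--     cnt=0
--     ch=0
--     for a in tags:
--         cnt+=1
--         if(a>a0):
--             a0 = a
--             ch+=cnt
--             cnt=0
--     return ch-1
-- ===== SOURCE B (Python) =====
-- def MaxCh(tags):
--     tags = list(tags)
--     if not tags:
--         return -1
--     m = max(tags)
--     if m <= 0:
--         return -1
--     return tags.index(m)
-- ===== Notes on version B (the rewrite author's own statement) =====
-- stated objective: simpler
-- what changed: A's single-pass running-maximum loop with cnt/ch accumulators is replaced by the direct characterization: the answer is the first index of the maximum element when that maximum is positive, else -1 (max() reduction plus .index() search).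
import Mathlib
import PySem

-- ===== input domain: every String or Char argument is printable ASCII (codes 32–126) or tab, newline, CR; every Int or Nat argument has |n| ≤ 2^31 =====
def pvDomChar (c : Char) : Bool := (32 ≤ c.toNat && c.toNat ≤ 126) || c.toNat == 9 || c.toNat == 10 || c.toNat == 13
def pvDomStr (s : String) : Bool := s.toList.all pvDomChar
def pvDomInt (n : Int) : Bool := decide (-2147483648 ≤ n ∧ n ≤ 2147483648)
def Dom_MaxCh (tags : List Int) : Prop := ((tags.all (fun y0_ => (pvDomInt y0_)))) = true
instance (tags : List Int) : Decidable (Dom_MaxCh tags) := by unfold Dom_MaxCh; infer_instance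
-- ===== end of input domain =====

-- B returns the first index of the maximum when it is positive, else -1; proved equal to A's running-max loop.

-- ===== PORT A =====
-- A's loop body over state (a0, cnt, ch)
def pvStepA (st : Int × Int × Int) (a : Int) : Int × Int × Int :=
  -- cnt += 1; if a > a0: a0 = a; ch += cnt; cnt = 0
  if st.1 < a then (a, 0, st.2.2 + (st.2.1 + 1)) else (st.1, st.2.1 + 1, st.2.2)

def MaxCh (tags : List Int) : Int :=
  (tags.foldl pvStepA (0, 0, 0)).2.2 - 1

-- ===== PORT B =====
def MaxCh_alt (tags : List Int) : Int :=
  -- tags = list(tags); if not tags: return -1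
  match PySem.List.max? tags (fun y => y) with
  | none => -1
  | some m =>
    if m ≤ 0 then -1
    else
      -- tags.index(m); the none branch is Python's ValueError, unreachable since m ∈ tags
      match PySem.List.index? tags m with
      | some i => (i : Int)
      | none => -1

-- ===== PRECONDITION & SPEC =====
def Spec_MaxCh (tags : List Int) (out : Int) : Prop := out = MaxCh_alt tags
instance (tags : List Int) (out : Int) : Decidable (Spec_MaxCh tags out) := by unfold Spec_MaxCh; infer_instance

-- ===== CLAIM (what is proved, stated in full; the proofs are below) =====
def Claim_equal_MaxCh : Prop := ∀ (tags : List Int), Dom_MaxCh tags → Spec_MaxCh tags (MaxCh tags)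

-- ===== LEMMAS AND PROOFS =====

lemma pv_foldl_max (t : List Int) : ∀ a b : Int,
    List.foldl max (max a b) t = max a (List.foldl max b t) := by
  induction t with
  | nil => intro a b; simp
  | cons c t ih =>
    intro a b
    simp only [List.foldl_cons]
    rw [max_assoc, ih]

-- final ch of A's loop from an arbitrary state, characterized by max and first index of max
lemma pv_loop_char (tags : List Int) : ∀ a0 cnt ch : Int,
    (tags.foldl pvStepA (a0, cnt, ch)).2.2 =
      match PySem.List.max? tags (fun y => y) with
      | none => ch
      | some m =>
        if a0 < m then
          ch + cnt + 1 + (((PySem.List.index? tags m).getD 0 : Nat) : Int)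
        else ch := by
  induction tags with
  | nil => intro a0 cnt ch; simp [PySem.List.max?]
  | cons a t ih =>
    intro a0 cnt ch
    rw [PySem.List.max?_id_cons]
    simp only [List.foldl_cons, pvStepA]
    by_cases hlt : a0 < a
    · simp only [if_pos hlt]
      rw [ih]
      cases t with
      | nil =>
        simp [PySem.List.max?, hlt]
        ring
      | cons b t' =>
        rw [PySem.List.max?_id_cons]
        have hM : List.foldl max a (b :: t') = max a (List.foldl max b t') := by
          simp only [List.foldl_cons]
          rw [pv_foldl_max]
        set m' := List.foldl max b t' with hm'
        by_cases hma : a < m'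
        · have hMe : List.foldl max a (b :: t') = m' := by rw [hM]; omega
          rw [hMe]
          have hne : a ≠ m' := by omega
          rw [PySem.List.index?_cons_of_ne _ hne]
          have : a0 < m' := by omega
          simp only [if_pos hma, if_pos this]
          cases hidx : PySem.List.index? (b :: t') m' with
          | none =>
            exfalso
            rw [PySem.List.index?_eq_none_iff] at hidx
            exact hidx (by
              have := PySem.List.max?_mem (xs := b :: t') (key := fun y => y)
                (m := m') (by rw [PySem.List.max?_id_cons])
              exact this)
          | some i =>
            simp only [Option.map_some, Option.getD_some]
            push_cast
            ring
        · have hMe : List.foldl max a (b :: t') = a := by rw [hM]; omega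
          rw [hMe]
          simp only [if_neg hma, if_pos hlt, PySem.List.index?_cons_self,
            Option.getD_some]
          push_cast
          ring
    · simp only [if_neg hlt]
      rw [ih]
      cases t with
      | nil =>
        simp [PySem.List.max?]
        intro h; omega
      | cons b t' =>
        rw [PySem.List.max?_id_cons]
        have hM : List.foldl max a (b :: t') = max a (List.foldl max b t') := by
          simp only [List.foldl_cons]
          rw [pv_foldl_max]
        set m' := List.foldl max b t' with hm'
        by_cases hm : a0 < m'
        · have hma : a < m' := by omega
          have hMe : List.foldl max a (b :: t') = m' := by rw [hM]; omega
          rw [hMe]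
          have hne : a ≠ m' := by omega
          rw [PySem.List.index?_cons_of_ne _ hne]
          simp only [if_pos hm]
          cases hidx : PySem.List.index? (b :: t') m' with
          | none =>
            exfalso
            rw [PySem.List.index?_eq_none_iff] at hidx
            exact hidx (PySem.List.max?_mem (xs := b :: t') (key := fun y => y)
              (m := m') (by rw [PySem.List.max?_id_cons]))
          | some i =>
            simp only [Option.map_some, Option.getD_some]
            push_cast
            ring
        · have hMle : List.foldl max a (b :: t') ≤ a0 := by rw [hM]; omega
          simp only [if_neg hm]
          rw [if_neg (by omega)]

-- ===== VERDICT (by name: the statement is the Claim_ definition above) =====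
theorem MaxCh_spec : Claim_equal_MaxCh := by
  intro tags _
  unfold Spec_MaxCh MaxCh MaxCh_alt
  rw [pv_loop_char]
  cases hmax : PySem.List.max? tags (fun y => y) with
  | none => simp
  | some m =>
    simp only
    by_cases hm : m ≤ 0
    · rw [if_neg (by omega), if_pos hm]; ring
    · rw [if_pos (by omega), if_neg hm]
      cases hidx : PySem.List.index? tags m with
      | none =>
        exfalso
        rw [PySem.List.index?_eq_none_iff] at hidx
        exact hidx (PySem.List.max?_mem hmax)
      | some i =>
        simp only [Option.getD_some]
        omega
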